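-- pv_equiv track=rewrite | github.com/MrBrantCode/unitest_baseline | mut_generate/mist_train_taco/taco_13629/solution.py | min_iterations_to_fill_ones
-- ===== SOURCE A (Python) =====
-- def min_iterations_to_fill_ones(arr, n):
--     max_dist = -1
--     last_one = -1
--
--     for i in range(n):
--         if arr[i] == 1:
--             if last_one == -1:
--                 max_dist = i
--             else:
--                 new_dist = i - last_one - 1
--                 max_dist = max(max_dist, (new_dist - 1) // 2 + 1)
--             last_one = i
--
--     if last_one != -1:
--         final_dist = n - last_one - 1
--         max_dist = max(max_dist, final_dist)
--
--     return -1 if max_dist == -1 else max_dist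
-- ===== SOURCE B (Python) =====
-- def min_iterations_to_fill_ones(arr, n):
--     vals = [arr[i] for i in range(n)]
--
--     def sweep(seq):
--         out, d = [], None
--         for x in seq:
--             d = 0 if x == 1 else (None if d is None else d + 1)
--             out.append(d)
--         return out
--
--     left = sweep(vals)
--     right = list(reversed(sweep(list(reversed(vals)))))
--     ans = -1
--     for li, ri in zip(left, right):
--         if li is None and ri is None:
--             continue
--         t = li if ri is None else (ri if li is None else min(li, ri))
--         if t > ans:
--             ans = t
--     return ans
-- ===== Notes on version B (the rewrite author's own statement) =====
-- stated objective: alternative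
-- what changed: B computes per-cell fill times by dynamic programming: a left-to-right sweep of distances since the last 1, a right-to-left sweep of distances to the next 1, and takes the maximum over cells of min(left,right), instead of A's single scan doing gap arithmetic (ceil(gap/2)) between consecutive ones.
import Mathlib
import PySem

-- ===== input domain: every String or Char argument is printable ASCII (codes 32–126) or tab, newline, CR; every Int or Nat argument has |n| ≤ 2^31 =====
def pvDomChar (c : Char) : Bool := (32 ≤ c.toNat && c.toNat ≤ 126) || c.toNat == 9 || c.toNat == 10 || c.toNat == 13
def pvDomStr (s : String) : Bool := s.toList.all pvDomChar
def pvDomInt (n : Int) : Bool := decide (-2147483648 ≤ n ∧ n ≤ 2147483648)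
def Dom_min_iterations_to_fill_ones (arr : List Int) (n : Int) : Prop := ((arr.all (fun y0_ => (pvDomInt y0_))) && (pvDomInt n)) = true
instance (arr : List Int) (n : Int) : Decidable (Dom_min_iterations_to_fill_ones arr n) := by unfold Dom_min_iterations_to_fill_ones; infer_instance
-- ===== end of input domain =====

-- B replaces A's single gap-arithmetic scan (state: max_dist, last_one) by a two-sweep
-- distance DP: per-cell distance since the last 1 (left sweep) and to the next 1 (right
-- sweep), answer = max over cells of min(left, right); objective: alternative algorithm.

-- ===== PORT A =====
-- state is (max_dist, last_one); for-loop over range(n) is a foldl over pyRange 0 n 1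
def min_iterations_to_fill_ones (arr : List Int) (n : Int) : Int :=
  let s := (PySem.List.pyRange 0 n 1).foldl
    (fun (st : Int × Int) i =>
      if PySem.List.pyGetD arr i 0 == 1 then
        if st.2 == -1 then (i, i)
        else (max st.1 (PySem.Int.floordiv ((i - st.2 - 1) - 1) 2 + 1), i)
      else st) (-1, -1)
  let maxDist := if s.2 ≠ -1 then max s.1 (n - s.2 - 1) else s.1
  if maxDist == -1 then -1 else maxDist

-- ===== PORT B =====
-- helper 'sweep' of Source B: running distance since the last 1 (None before any 1), appended per cell
def pvSweepB (seq : List Int) : List (Option Int) :=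
  (seq.foldl
    (fun (st : Option Int × List (Option Int)) (x : Int) =>
      let d := if x == 1 then some 0 else
        (match st.1 with | none => none | some y => some (y + 1))
      (d, st.2 ++ [d])) (none, [])).2

def min_iterations_to_fill_ones_alt (arr : List Int) (n : Int) : Int :=
  let vals := (PySem.List.pyRange 0 n 1).map (fun i => PySem.List.pyGetD arr i 0)
  let left := pvSweepB vals
  let right := (pvSweepB vals.reverse).reverse
  (left.zip right).foldl
    (fun ans p =>
      match p.1, p.2 with
      | none, none => ans
      | some t, none => if t > ans then t else ans
      | none, some t => if t > ans then t else ans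
      | some a, some b => if min a b > ans then min a b else ans) (-1)

-- ===== PRECONDITION & SPEC =====
-- Pre_ excludes exactly the inputs where Python A raises IndexError: n exceeding len(arr)
def Pre_min_iterations_to_fill_ones (arr : List Int) (n : Int) : Prop := n ≤ (arr.length : Int)
instance (arr : List Int) (n : Int) : Decidable (Pre_min_iterations_to_fill_ones arr n) := by unfold Pre_min_iterations_to_fill_ones; infer_instance
def pvWitness_min_iterations_to_fill_ones : List Int × Int := ([1, 0, 0, 1, 0], 5)

def Spec_min_iterations_to_fill_ones (arr : List Int) (n : Int) (out : Int) : Prop := out = min_iterations_to_fill_ones_alt arr n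
instance (arr : List Int) (n : Int) (out : Int) : Decidable (Spec_min_iterations_to_fill_ones arr n out) := by unfold Spec_min_iterations_to_fill_ones; infer_instance

-- ===== CLAIM (what is proved, stated in full; the proofs are below) =====
def Claim_equal_min_iterations_to_fill_ones : Prop := ∀ (arr : List Int) (n : Int), Dom_min_iterations_to_fill_ones arr n → Pre_min_iterations_to_fill_ones arr n → Spec_min_iterations_to_fill_ones arr n (min_iterations_to_fill_ones arr n)

-- ===== LEMMAS AND PROOFS =====

-- ---------- abstract sweeps over boolean cell lists ----------

-- successor on an optional distance
def pvO : Option Int → Option Int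
  | none => none
  | some y => some (y + 1)

-- left sweep: distance since the last true cell
def pvB : Option Int → List Bool → List (Option Int)
  | _, [] => []
  | d, b :: t => let d' := if b then some 0 else pvO d; d' :: pvB d' t

-- right sweep (structural): distance to the next true cell, boundary value d
def pvR : List Bool → Option Int → List (Option Int)
  | [], _ => []
  | b :: t, d =>
    let r := pvR t d
    (if b then some 0 else pvO (r.headD d)) :: r

-- shift an optional distance by j
def pvM (j : Int) : Option Int → Option Int
  | none => none
  | some y => some (y + j)

-- ascending run some (x+1) … some (x+k)
def pvA : Int → Nat → List (Option Int)
  | _, 0 => []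
  | x, k+1 => some (x + 1) :: pvA (x + 1) k

-- descending run pvM k d, …, pvM 1 d
def pvDn (d : Option Int) : Nat → List (Option Int)
  | 0 => []
  | k+1 => pvM (k + 1) d :: pvDn d k

-- ---------- shape of a boolean list: leading zeros + a zero-run after each one ----------

def pvFlat : List Nat → List Bool
  | [] => []
  | g :: bl => true :: (List.replicate g false ++ pvFlat bl)

def pvToBs (k0 : Nat) (bl : List Nat) : List Bool := List.replicate k0 false ++ pvFlat bl

def pvParse : List Bool → Nat × List Nat
  | [] => (0, [])
  | false :: t => let q := pvParse t; (q.1 + 1, q.2)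
  | true :: t => let q := pvParse t; (0, q.1 :: q.2)

def pvW : List Nat → Nat
  | [] => 0
  | g :: bl => g + 1 + pvW bl

-- positions of the ones of pvToBs s bl (s = absolute start of the first one)
def pvPos : Int → List Nat → List Int
  | _, [] => []
  | s, g :: bl => s :: pvPos (s + g + 1) bl

-- positions of true cells, counting from s
def pvOnes : Int → List Bool → List Int
  | _, [] => []
  | s, b :: t => if b then s :: pvOnes (s + 1) t else pvOnes (s + 1) t

-- ceil(g/2) in A's arithmetic
def pvC (g : Nat) : Int := PySem.Int.floordiv ((g : Int) - 1) 2 + 1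

-- the common value on shape (k0, bl), bl ≠ []: max of k0, interior ceils, trailing gap
def pvT : List Nat → Int → Int
  | [], b => b
  | [g], b => max b (g : Int)
  | g :: g' :: bl, b => pvT (g' :: bl) (max b (pvC g))

-- A-side formula: the gap computation on the list of one-positions
def pvGapG (ones : List Int) (n : Int) : Int :=
  match ones with
  | [] => -1
  | o :: rest =>
    ((o :: rest).zip rest).foldl
      (fun b p => max b (PySem.Int.floordiv (p.2 - p.1 - 2) 2 + 1))
      (max o (n - 1 - rest.getLastD o))

-- B-side combine step (identical to the port's lambda)
def pvCb : Int → Option Int × Option Int → Int := fun ans p =>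
  match p.1, p.2 with
  | none, none => ans
  | some t, none => if t > ans then t else ans
  | none, some t => if t > ans then t else ans
  | some a, some b => if min a b > ans then min a b else ans

-- fill time of a cell from its two sweep distances
def pvV : Option Int × Option Int → Option Int := fun p =>
  match p.1, p.2 with
  | none, none => none
  | some t, none => some t
  | none, some t => some t
  | some a, some b => some (min a b)

theorem pvCb_eq (b : Int) (p : Option Int × Option Int) :
    pvCb b p = match pvV p with | none => b | some t => max b t := by
  obtain ⟨x, y⟩ := p
  cases x <;> cases y <;>
    simp only [pvCb, pvV] <;> split_ifs <;> simp_all [max_def, min_def] <;> omega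


-- ---------- pvC arithmetic ----------

theorem pvC_def' (g : Nat) : pvC g = ((g : Int) - 1) / 2 + 1 := by
  unfold pvC
  rw [PySem.Int.floordiv_eq_ediv_of_pos (by norm_num)]

theorem pvC_nonneg' (g : Nat) : 0 ≤ pvC g := by
  rw [pvC_def']; omega

-- ---------- basic facts about the sweeps ----------

-- the port's sweep is pvB over the boolean cell list
theorem pvSweepB_fold (seq : List Int) :
    ∀ (d : Option Int) (acc : List (Option Int)),
      (seq.foldl
        (fun (st : Option Int × List (Option Int)) (x : Int) =>
          let d := if x == 1 then some 0 else
            (match st.1 with | none => none | some y => some (y + 1))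
          (d, st.2 ++ [d])) (d, acc)).2
      = acc ++ pvB d (seq.map (fun x => x == 1)) := by
  induction seq with
  | nil => intro d acc; simp [pvB]
  | cons x t ih =>
    intro d acc
    simp only [List.foldl_cons, List.map_cons, pvB]
    have hO : (match d with | none => none | some y => some (y + 1)) = pvO d := by
      cases d <;> rfl
    simp only [hO]
    rw [ih]
    simp

theorem pvSweepB_eq (seq : List Int) :
    pvSweepB seq = pvB none (seq.map (fun x => x == 1)) := by
  unfold pvSweepB
  rw [pvSweepB_fold]
  simp

-- left sweep over an appended cell
theorem getLastD_cons' {α : Type} (x : α) (r : List α) (d : α) :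
    (x :: r).getLastD d = r.getLastD x := by
  cases r with
  | nil => rfl
  | cons a t =>
    rw [List.getLastD_eq_getLast?, List.getLastD_eq_getLast?, List.getLast?_cons_cons,
      List.getLast?_eq_some_getLast (l := a :: t) (by simp)]
    rfl

theorem pvB_snoc (l : List Bool) (b : Bool) : ∀ d,
    pvB d (l ++ [b]) = pvB d l ++ [if b then some 0 else pvO ((pvB d l).getLastD d)] := by
  induction l with
  | nil => intro d; simp [pvB]
  | cons c t ih =>
    intro d
    simp only [List.cons_append, pvB]
    rw [ih, getLastD_cons']

theorem pvR_rev (l : List Bool) :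
    (pvB none l.reverse).reverse = pvR l none := by
  induction l with
  | nil => rfl
  | cons b t ih =>
    have hlast : (pvB none t.reverse).getLastD none = (pvR t none).headD none := by
      rw [← ih, List.getLastD_eq_getLast?, List.headD_eq_head?_getD, List.head?_reverse]
    simp only [List.reverse_cons, pvB_snoc, List.reverse_append, pvR, hlast, ih]
    simp

-- ---------- computing the sweeps on a shaped list ----------

theorem headD_append {α : Type} (l₁ l₂ : List α) (x : α) :
    (l₁ ++ l₂).headD x = l₁.headD (l₂.headD x) := by
  cases l₁ <;> simp

theorem pvO_M (j : Int) (d : Option Int) : pvO (pvM j d) = pvM (j + 1) d := by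
  cases d
  · rfl
  · simp only [pvO, pvM]
    ring_nf

theorem pvR_append (l₁ l₂ : List Bool) (d : Option Int) :
    pvR (l₁ ++ l₂) d = pvR l₁ ((pvR l₂ d).headD d) ++ pvR l₂ d := by
  induction l₁ with
  | nil => rfl
  | cons b t ih =>
    simp only [List.cons_append, pvR, ih, headD_append]

theorem pvDn_headD (d : Option Int) (k : Nat) :
    (pvDn d k).headD d = pvM k d := by
  cases k with
  | zero => cases d <;> simp [pvDn, pvM]
  | succ k => simp [pvDn]

theorem pvR_replicate (k : Nat) (d : Option Int) :
    pvR (List.replicate k false) d = pvDn d k := by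
  induction k with
  | zero => rfl
  | succ k ih =>
    simp only [List.replicate_succ, pvR, ih, pvDn, pvDn_headD, pvO_M]
    norm_num

-- right-sweep values of the flattened shape
def pvRF : List Nat → List (Option Int)
  | [] => []
  | g :: bl => some 0 :: (pvDn ((pvRF bl).headD none) g ++ pvRF bl)

theorem pvR_flat (bl : List Nat) : pvR (pvFlat bl) none = pvRF bl := by
  induction bl with
  | nil => rfl
  | cons g bl ih =>
    simp only [pvFlat, pvR, pvRF, pvR_append, ih, pvR_replicate]
    simp

-- left-sweep values of the flattened shape
def pvLF : List Nat → List (Option Int)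
  | [] => []
  | g :: bl => some 0 :: (pvA 0 g ++ pvLF bl)

theorem pvB_replicate (k : Nat) (l : List Bool) : ∀ (x : Int),
    pvB (some x) (List.replicate k false ++ l) = pvA x k ++ pvB (some (x + k)) l := by
  induction k with
  | zero => intro x; simp [pvA]
  | succ k ih =>
    intro x
    rw [List.replicate_succ]
    simp only [List.cons_append, pvB, pvO, pvA, Bool.false_eq_true, if_false]
    rw [ih (x + 1)]
    have h : x + 1 + (k : Int) = x + (((k + 1 : Nat) : Int)) := by push_cast; ring
    rw [h]

theorem pvB_replicate_none (k : Nat) (l : List Bool) :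
    pvB none (List.replicate k false ++ l) = List.replicate k none ++ pvB none l := by
  induction k with
  | zero => simp
  | succ k ih => simp [List.replicate_succ, pvB, pvO, ih]

theorem pvB_flat (bl : List Nat) : ∀ d, pvB d (pvFlat bl) = pvLF bl := by
  induction bl with
  | nil => intro d; rfl
  | cons g bl ih =>
    intro d
    simp only [pvFlat, pvB, pvLF, if_true]
    rw [pvB_replicate, ih]

theorem pvA_length (k : Nat) : ∀ x, (pvA x k).length = k := by
  induction k with
  | zero => intro x; rfl
  | succ k ih => intro x; simp [pvA, ih]

theorem pvDn_length (d : Option Int) (k : Nat) : (pvDn d k).length = k := by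
  induction k with
  | zero => rfl
  | succ k ih => simp [pvDn, ih]

-- map forms of the runs (for membership reasoning)
theorem pvA_map (k : Nat) : ∀ x, pvA x k = (List.range k).map (fun j : Nat => some (x + (j : Int) + 1)) := by
  induction k with
  | zero => intro x; rfl
  | succ k ih =>
    intro x
    rw [List.range_succ_eq_map, List.map_cons, List.map_map]
    simp only [pvA]
    congr 1
    · norm_num
    · rw [ih (x + 1)]
      apply List.map_congr_left
      intro j _
      simp only [Function.comp_apply]
      congr 1
      push_cast
      ring

theorem pvDn_map (d : Option Int) (k : Nat) :
    pvDn d k = (List.range k).map (fun j : Nat => pvM ((k : Int) - (j : Int)) d) := by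
  induction k with
  | zero => rfl
  | succ k ih =>
    rw [List.range_succ_eq_map, List.map_cons, List.map_map]
    simp only [pvDn]
    congr 1
    rw [ih]
    apply List.map_congr_left
    intro j _
    simp only [Function.comp_apply]
    congr 1
    push_cast
    ring


-- ---------- the combine fold: max of the defined per-cell fill times ----------

theorem pvCb_ge (l : List (Option Int × Option Int)) : ∀ b : Int, b ≤ l.foldl pvCb b := by
  induction l with
  | nil => intro b; simp
  | cons p t ih =>
    intro b
    refine le_trans ?_ (ih (pvCb b p))
    rw [pvCb_eq]
    cases pvV p with
    | none => simp
    | some t => simp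

theorem pvCb_le (l : List (Option Int × Option Int)) : ∀ (b M : Int),
    (∀ p ∈ l, ∀ t, pvV p = some t → t ≤ M) → l.foldl pvCb b ≤ max b M := by
  induction l with
  | nil => intro b M _; simp
  | cons p t ih =>
    intro b M h
    refine le_trans (ih (pvCb b p) M (fun q hq => h q (by simp [hq]))) ?_
    have hp : pvCb b p ≤ max b M := by
      rw [pvCb_eq]
      cases hv : pvV p with
      | none => simp
      | some v => exact max_le (le_max_left _ _) (le_trans (h p (by simp) v hv) (le_max_right _ _))
    exact max_le (le_trans hp (by simp)) (by simp)

theorem pvCb_mem (l : List (Option Int × Option Int)) : ∀ (b t : Int) (p : Option Int × Option Int),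
    p ∈ l → pvV p = some t → t ≤ l.foldl pvCb b := by
  induction l with
  | nil => intro b t p hp; simp at hp
  | cons q r ih =>
    intro b t p hp hv
    rcases List.mem_cons.mp hp with h | h
    · subst h
      refine le_trans ?_ (pvCb_ge r (pvCb b p))
      rw [pvCb_eq, hv]
      simp
    · exact ih (pvCb b q) t p h hv

theorem pvCb_fold_max (l : List (Option Int × Option Int)) (b M : Int)
    (hb : ∀ p ∈ l, ∀ t, pvV p = some t → t ≤ M)
    (hw : ∃ p ∈ l, pvV p = some M) : l.foldl pvCb b = max b M := by
  obtain ⟨p, hp, hv⟩ := hw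
  exact le_antisymm (pvCb_le l b M hb) (max_le (pvCb_ge l b) (pvCb_mem l b M p hp hv))

theorem pvCb_fold_skip (k : Nat) : ∀ b : Int,
    (List.replicate k ((none : Option Int), (none : Option Int))).foldl pvCb b = b := by
  induction k with
  | zero => intro b; rfl
  | succ k ih => intro b; simpa [List.replicate_succ, pvCb] using ih _

theorem pvDn_none (k : Nat) : pvDn none k = List.replicate k none := by
  induction k with
  | zero => rfl
  | succ k ih => simp [pvDn, pvM, ih, List.replicate_succ]

theorem replicate_none_map (k : Nat) :
    List.replicate k (none : Option Int) = (List.range k).map (fun _ => none) := by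
  simp [List.map_const']

-- prefix segment: k leading zero cells before the first one (right distances k, …, 1)
theorem pvFold_prefix (k : Nat) (b : Int) (hk : 1 ≤ k) :
    ((List.replicate k (none : Option Int)).zip (pvDn (some 0) k)).foldl pvCb b
      = max b k := by
  rw [replicate_none_map, pvDn_map, List.zip_map']
  apply pvCb_fold_max
  · intro p hp t hv
    obtain ⟨j, hj, rfl⟩ := List.mem_map.mp hp
    have hjk : j < k := List.mem_range.mp hj
    simp only [pvV, pvM] at hv
    have : t = 0 + ((k : Int) - j) := by exact Option.some.inj hv.symm
    omega
  · refine ⟨(none, pvM ((k : Int) - (0 : Nat)) (some 0)), List.mem_map.mpr ⟨0, List.mem_range.mpr hk, rfl⟩, ?_⟩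
    simp [pvV, pvM]

-- interior segment: a one, then g zero cells, then another one
theorem pvFold_seg_mid (g : Nat) (b : Int) :
    (((some 0 :: pvA 0 g)).zip (some 0 :: pvDn (some 0) g)).foldl pvCb b
      = max b (pvC g) := by
  rw [List.zip_cons_cons, pvA_map, pvDn_map, List.zip_map']
  apply pvCb_fold_max
  · intro p hp t hv
    rcases List.mem_cons.mp hp with h | h
    · subst h
      simp only [pvV] at hv
      have : t = min 0 0 := Option.some.inj hv.symm
      have := pvC_nonneg' g
      omega
    · obtain ⟨j, hj, rfl⟩ := List.mem_map.mp h
      have hjk : j < g := List.mem_range.mp hj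
      simp only [pvV, pvM] at hv
      have ht : t = min (0 + (j : Int) + 1) (0 + ((g : Int) - j)) := Option.some.inj hv.symm
      rw [pvC_def'] at *
      omega
  · rcases Nat.eq_zero_or_pos g with hg | hg
    · subst hg
      refine ⟨(some 0, some 0), by simp, ?_⟩
      have : pvC 0 = 0 := by rw [pvC_def']; norm_num
      simp [pvV, this]
    · have hjmem : (g-1)/2 ∈ List.range g := List.mem_range.mpr (by omega)
      refine ⟨(some (0 + ((g-1)/2 : Nat) + 1), pvM ((g : Int) - ((g-1)/2 : Nat)) (some 0)),
        List.mem_cons_of_mem _ (List.mem_map.mpr ⟨(g-1)/2, hjmem, rfl⟩), ?_⟩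
      simp only [pvV, pvM]
      congr 1
      have hcast : (((g-1)/2 : Nat) : Int) = ((g : Int) - 1) / 2 := by
        push_cast [hg]
        norm_num
      rw [pvC_def', hcast]
      omega

-- trailing segment: the last one followed by g zero cells (no one to the right)
theorem pvFold_seg_last (g : Nat) (b : Int) :
    (((some 0 :: pvA 0 g)).zip (some 0 :: List.replicate g none)).foldl pvCb b
      = max b g := by
  rw [List.zip_cons_cons, pvA_map, replicate_none_map, List.zip_map']
  apply pvCb_fold_max
  · intro p hp t hv
    rcases List.mem_cons.mp hp with h | h
    · subst h
      simp only [pvV] at hv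
      have : t = min 0 0 := Option.some.inj hv.symm
      omega
    · obtain ⟨j, hj, rfl⟩ := List.mem_map.mp h
      have hjk : j < g := List.mem_range.mp hj
      simp only [pvV] at hv
      have : t = 0 + (j : Int) + 1 := Option.some.inj hv.symm
      omega
  · rcases Nat.eq_zero_or_pos g with hg | hg
    · subst hg
      exact ⟨(some 0, some 0), by simp, by simp [pvV]⟩
    · have hjmem : g - 1 ∈ List.range g := List.mem_range.mpr (by omega)
      refine ⟨(some (0 + ((g-1) : Nat) + 1), none),
        List.mem_cons_of_mem _ (List.mem_map.mpr ⟨g - 1, hjmem, rfl⟩), ?_⟩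
      simp only [pvV]
      congr 1
      push_cast [hg]
      ring

-- pvT pulls a max through
theorem pvT_pull (bl : List Nat) : ∀ (x b : Int), bl ≠ [] → pvT bl (max x b) = max x (pvT bl b) := by
  induction bl with
  | nil => intro x b h; exact absurd rfl h
  | cons g G ih =>
    intro x b _
    cases G with
    | nil => simp [pvT, max_assoc]
    | cons g' G' =>
      simp only [pvT]
      rw [max_assoc]
      exact ih x (max b (pvC g)) (by simp)

theorem pvT_nonneg (bl : List Nat) : ∀ b : Int, bl ≠ [] → 0 ≤ pvT bl b := by
  induction bl with
  | nil => intro b h; exact absurd rfl h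
  | cons g G ih =>
    intro b _
    cases G with
    | nil =>
      simp only [pvT]
      exact le_trans (Int.natCast_nonneg g) (le_max_right _ _)
    | cons g' G' => exact ih (max b (pvC g)) (by simp)

-- the combine fold over the flattened shape
theorem pvFold_flat (bl : List Nat) : ∀ b : Int, bl ≠ [] →
    ((pvLF bl).zip (pvRF bl)).foldl pvCb b = pvT bl b := by
  induction bl with
  | nil => intro b h; exact absurd rfl h
  | cons g G ih =>
    intro b _
    cases G with
    | nil =>
      have hL : pvLF [g] = some 0 :: pvA 0 g := by
        rw [show pvLF [g] = some 0 :: (pvA 0 g ++ pvLF []) from rfl]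
        simp [pvLF]
      have hR : pvRF [g] = some 0 :: List.replicate g none := by
        rw [show pvRF [g] = some 0 :: (pvDn ((pvRF []).headD none) g ++ pvRF []) from rfl]
        simp [pvRF, pvDn_none]
      rw [hL, hR, pvFold_seg_last]
      rfl
    | cons g' G' =>
      have hh : (pvRF (g' :: G')).headD none = some 0 := rfl
      have hL : pvLF (g :: g' :: G') = (some 0 :: pvA 0 g) ++ pvLF (g' :: G') := by
        rw [show pvLF (g :: g' :: G') = some 0 :: (pvA 0 g ++ pvLF (g' :: G')) from rfl]
        simp
      have hR : pvRF (g :: g' :: G') = (some 0 :: pvDn (some 0) g) ++ pvRF (g' :: G') := by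
        rw [show pvRF (g :: g' :: G')
              = some 0 :: (pvDn ((pvRF (g' :: G')).headD none) g ++ pvRF (g' :: G')) from rfl, hh]
        simp
      rw [hL, hR, List.zip_append (by simp [pvA_length, pvDn_length]), List.foldl_append,
        pvFold_seg_mid]
      exact ih (max b (pvC g)) (by simp)

-- the full B-side value on a shaped input
theorem pvB_shape_nil (k0 : Nat) :
    ((pvB none (pvToBs k0 [])).zip (pvR (pvToBs k0 []) none)).foldl pvCb (-1) = -1 := by
  unfold pvToBs
  rw [show pvFlat [] = ([] : List Bool) from rfl, List.append_nil]
  have hB : pvB none (List.replicate k0 false) = List.replicate k0 none := by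
    have := pvB_replicate_none k0 []
    simpa [pvB] using this
  rw [hB, pvR_replicate, pvDn_none, List.zip_replicate]
  simp only [min_self]
  exact pvCb_fold_skip k0 (-1)

theorem pvB_shape_cons (k0 : Nat) (g : Nat) (G : List Nat) :
    ((pvB none (pvToBs k0 (g :: G))).zip (pvR (pvToBs k0 (g :: G)) none)).foldl pvCb (-1)
      = pvT (g :: G) (k0 : Int) := by
  unfold pvToBs
  rw [pvR_append, pvR_flat, pvR_replicate, pvB_replicate_none, pvB_flat]
  have hh : (pvRF (g :: G)).headD none = some 0 := rfl
  rw [hh]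
  rw [List.zip_append (by simp [pvDn_length]), List.foldl_append]
  rcases Nat.eq_zero_or_pos k0 with hk | hk
  · subst hk
    simp only [List.replicate_zero, pvDn, List.zip_nil_left, List.foldl_nil]
    rw [pvFold_flat _ _ (by simp)]
    have h1 : pvT (g :: G) ((0 : Nat) : Int) = pvT (g :: G) (max 0 (-1)) := by norm_num
    rw [h1, pvT_pull _ _ _ (by simp)]
    have := pvT_nonneg (g :: G) (-1) (by simp)
    omega
  · rw [pvFold_prefix k0 (-1) hk, pvFold_flat _ _ (by simp)]
    have h2 : max (-1) (k0 : Int) = (k0 : Int) := by omega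
    rw [h2]


-- ---------- A-side: the scan equals the gap formula on the one-positions ----------

-- the one-position step of A's loop (what A does at an index with arr[i] == 1)
def pvStepO : Int × Int → Int → Int × Int := fun st i =>
  if st.2 == -1 then (i, i)
  else (max st.1 (PySem.Int.floordiv ((i - st.2 - 1) - 1) 2 + 1), i)

-- the adjacent-pair gap step
def pvZStep : Int → Int × Int → Int := fun b p =>
  max b (PySem.Int.floordiv (p.2 - p.1 - 2) 2 + 1)

theorem pvZFold_max (l : List (Int × Int)) (m c : Int) :
    l.foldl pvZStep (max m c) = max (l.foldl pvZStep m) c := by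
  induction l generalizing m with
  | nil => rfl
  | cons p t ih =>
    have h1 : pvZStep (max m c) p = max (pvZStep m p) c := by
      simp only [pvZStep]; omega
    simp only [List.foldl_cons, h1]
    exact ih _

-- A's loop over the remaining one-positions = the pair fold plus the last position
theorem pvChain (t : List Int) (m h : Int) (hh : 0 ≤ h) (ht : ∀ x ∈ t, 0 ≤ x) :
    t.foldl pvStepO (m, h) = (((h :: t).zip t).foldl pvZStep m, t.getLastD h) := by
  induction t generalizing m h with
  | nil => rfl
  | cons c t' ih =>
    have hc : 0 ≤ c := ht c (by simp)
    have hstep : pvStepO (m, h) c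
        = (max m (PySem.Int.floordiv (c - h - 2) 2 + 1), c) := by
      simp only [pvStepO]
      rw [if_neg (by simp; omega)]
      norm_num
      ring_nf
    simp only [List.foldl_cons, hstep]
    rw [ih _ c hc (fun x hx => ht x (by simp [hx])), List.zip_cons_cons,
      List.foldl_cons, List.getLastD_cons]
    rfl

-- A's port equals the gap formula applied to the filtered one-positions
theorem pvA_to_gap (arr : List Int) (n : Int) :
    min_iterations_to_fill_ones arr n
      = pvGapG ((PySem.List.pyRange 0 n 1).filter
          (fun i => PySem.List.pyGetD arr i 0 == 1)) n := by
  unfold min_iterations_to_fill_ones pvGapG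
  rw [show (fun (st : Int × Int) i =>
        if PySem.List.pyGetD arr i 0 == 1 then
          if st.2 == -1 then (i, i)
          else (max st.1 (PySem.Int.floordiv ((i - st.2 - 1) - 1) 2 + 1), i)
        else st)
      = (fun st i => if PySem.List.pyGetD arr i 0 == 1 then pvStepO st i else st) from rfl,
     ← List.foldl_filter]
  cases hos : (PySem.List.pyRange 0 n 1).filter (fun i => PySem.List.pyGetD arr i 0 == 1) with
  | nil => rfl
  | cons o rest =>
    have hmem : ∀ x ∈ o :: rest, 0 ≤ x := by
      intro x hx
      have hx' : x ∈ (PySem.List.pyRange 0 n 1).filter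
          (fun i => PySem.List.pyGetD arr i 0 == 1) := by rw [hos]; exact hx
      have := PySem.List.mem_pyRange_one.mp (List.mem_of_mem_filter hx')
      omega
    have ho : 0 ≤ o := hmem o (by simp)
    have hfirst : pvStepO (-1, -1) o = (o, o) := by simp [pvStepO]
    simp only [List.foldl_cons, hfirst]
    rw [pvChain rest o o ho (fun x hx => hmem x (by simp [hx]))]
    have hlast : 0 ≤ rest.getLastD o := by
      cases hr : rest.getLast? with
      | none => simpa [List.getLastD_eq_getLast?, hr] using ho
      | some y =>
        have : y ∈ rest := List.mem_of_getLast? hr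
        simpa [List.getLastD_eq_getLast?, hr] using hmem y (by simp [this])
    rw [show (fun (b : Int) (p : Int × Int) =>
          max b (PySem.Int.floordiv (p.2 - p.1 - 2) 2 + 1)) = pvZStep from rfl]
    rw [show n - 1 - rest.getLastD o = n - rest.getLastD o - 1 from by ring, pvZFold_max]
    split_ifs with h1 h2 <;> simp_all

theorem getLastD_ne_nil {α : Type} (l : List α) (x y : α) (h : l ≠ []) :
    l.getLastD x = l.getLastD y := by
  cases l with
  | nil => exact absurd rfl h
  | cons a t => rw [getLastD_cons', getLastD_cons']

-- the interior-gap fold on the positions of a shape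
def pvD : List Nat → Int → Int
  | [], b => b
  | [_], b => b
  | g :: g' :: bl, b => pvD (g' :: bl) (max b (pvC g))

theorem pvFoldPos (bl : List Nat) : ∀ (s b : Int),
    ((pvPos s bl).zip (pvPos s bl).tail).foldl pvZStep b = pvD bl b := by
  induction bl with
  | nil => intro s b; rfl
  | cons g G ih =>
    intro s b
    cases G with
    | nil => rfl
    | cons g' G' =>
      rw [show pvPos s (g :: g' :: G') = s :: pvPos (s + g + 1) (g' :: G') from rfl]
      rw [show (s :: pvPos (s + g + 1) (g' :: G')).tail = pvPos (s + g + 1) (g' :: G') from rfl]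
      rw [show pvPos (s + g + 1) (g' :: G')
            = (s + g + 1) :: pvPos (s + g + 1 + g' + 1) G' from rfl]
      rw [List.zip_cons_cons, List.foldl_cons]
      have hstep : pvZStep b (s, s + (g : Int) + 1) = max b (pvC g) := by
        simp only [pvZStep, pvC]
        rw [show s + (g : Int) + 1 - s - 2 = (g : Int) - 1 from by ring]
      rw [hstep]
      rw [show pvD (g :: g' :: G') b = pvD (g' :: G') (max b (pvC g)) from rfl]
      exact ih (s + g + 1) (max b (pvC g))

theorem pvPos_getLastD (bl : List Nat) : ∀ (s x : Int), bl ≠ [] →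
    (pvPos s bl).getLastD x = s + (pvW bl : Int) - 1 - ((bl.getLastD 0 : Nat) : Int) := by
  induction bl with
  | nil => intro s x h; exact absurd rfl h
  | cons g G ih =>
    intro s x _
    cases G with
    | nil =>
      rw [show pvPos s [g] = [s] from rfl,
        show ([s] : List Int).getLastD x = s from rfl,
        show (([g] : List Nat).getLastD 0) = g from rfl,
        show pvW [g] = g + 1 from rfl]
      push_cast
      ring
    | cons g' G' =>
      rw [show pvPos s (g :: g' :: G') = s :: pvPos (s + g + 1) (g' :: G') from rfl,
        getLastD_cons', ih (s + g + 1) s (by simp)]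
      have h1 : (g :: g' :: G').getLastD 0 = (g' :: G').getLastD 0 := by
        rw [getLastD_cons']
        exact getLastD_ne_nil _ _ _ (by simp)
      rw [h1]
      simp only [pvW]
      push_cast
      ring

theorem pvD_to_pvT (bl : List Nat) : ∀ b : Int, bl ≠ [] →
    pvD bl (max b ((bl.getLastD 0 : Nat) : Int)) = pvT bl b := by
  induction bl with
  | nil => intro b h; exact absurd rfl h
  | cons g G ih =>
    intro b _
    cases G with
    | nil => rfl
    | cons g' G' =>
      have h1 : (g :: g' :: G').getLastD 0 = (g' :: G').getLastD 0 := by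
        rw [getLastD_cons']
        exact getLastD_ne_nil _ _ _ (by simp)
      rw [h1]
      rw [show pvD (g :: g' :: G') (max b ((((g' :: G').getLastD 0 : Nat)) : Int))
            = pvD (g' :: G') (max (max b (((g' :: G').getLastD 0 : Nat) : Int)) (pvC g)) from rfl]
      rw [max_right_comm]
      exact ih (max b (pvC g)) (by simp)

theorem pvGapG_cons (o : Int) (rest : List Int) (n : Int) :
    pvGapG (o :: rest) n
      = ((o :: rest).zip rest).foldl
          (fun b p => max b (PySem.Int.floordiv (p.2 - p.1 - 2) 2 + 1))
          (max o (n - 1 - rest.getLastD o)) := rfl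

-- the A-side value on a shaped input
theorem pvGapG_shape (bl : List Nat) (s : Int) (hbl : bl ≠ []) :
    pvGapG (pvPos s bl) (s + (pvW bl : Int)) = pvT bl s := by
  obtain ⟨g, G, rfl⟩ : ∃ g G, bl = g :: G := by
    cases bl with
    | nil => exact absurd rfl hbl
    | cons g G => exact ⟨g, G, rfl⟩
  rw [show pvPos s (g :: G) = s :: pvPos (s + g + 1) G from rfl, pvGapG_cons]
  have hL : (pvPos (s + g + 1) G).getLastD s = (pvPos s (g :: G)).getLastD 0 := by
    rw [show pvPos s (g :: G) = s :: pvPos (s + g + 1) G from rfl, getLastD_cons']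
  have hlast : s + (pvW (g :: G) : Int) - 1 - (pvPos (s + g + 1) G).getLastD s
      = (((g :: G).getLastD 0 : Nat) : Int) := by
    rw [hL, pvPos_getLastD (g :: G) s 0 (by simp)]
    ring
  rw [hlast]
  rw [show (fun (b : Int) (p : Int × Int) =>
        max b (PySem.Int.floordiv (p.2 - p.1 - 2) 2 + 1)) = pvZStep from rfl]
  rw [show ((s :: pvPos (s + (g : Int) + 1) G).zip (pvPos (s + (g : Int) + 1) G))
        = ((pvPos s (g :: G)).zip (pvPos s (g :: G)).tail) from rfl]
  rw [pvFoldPos]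
  exact pvD_to_pvT (g :: G) s (by simp)

-- ---------- bridges: range/filter/map to shapes ----------

theorem pvFlat_length (bl : List Nat) : (pvFlat bl).length = pvW bl := by
  induction bl with
  | nil => rfl
  | cons g G ih => simp [pvFlat, pvW, ih]; omega

theorem pvToBs_length (k0 : Nat) (bl : List Nat) :
    (pvToBs k0 bl).length = k0 + pvW bl := by
  simp [pvToBs, pvFlat_length]

theorem pvParse_toBs (bs : List Bool) : pvToBs (pvParse bs).1 (pvParse bs).2 = bs := by
  induction bs with
  | nil => rfl
  | cons b t ih =>
    cases b with
    | false =>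
      rw [show pvParse (false :: t) = ((pvParse t).1 + 1, (pvParse t).2) from rfl]
      rw [show pvToBs ((pvParse t).1 + 1) (pvParse t).2
            = false :: pvToBs (pvParse t).1 (pvParse t).2 from by
        unfold pvToBs; rw [List.replicate_succ]; rfl]
      rw [ih]
    | true =>
      rw [show pvParse (true :: t) = (0, (pvParse t).1 :: (pvParse t).2) from rfl]
      rw [show pvToBs 0 ((pvParse t).1 :: (pvParse t).2)
            = true :: pvToBs (pvParse t).1 (pvParse t).2 from by
        unfold pvToBs; simp [pvFlat]]
      rw [ih]

theorem pvOnes_rep (k : Nat) : ∀ (l : List Bool) (s : Int),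
    pvOnes s (List.replicate k false ++ l) = pvOnes (s + k) l := by
  induction k with
  | zero => intro l s; simp
  | succ k ih =>
    intro l s
    rw [List.replicate_succ, List.cons_append,
      show pvOnes s (false :: (List.replicate k false ++ l))
        = pvOnes (s + 1) (List.replicate k false ++ l) from rfl, ih]
    congr 1
    push_cast
    ring

theorem pvOnes_flat (bl : List Nat) : ∀ s : Int, pvOnes s (pvFlat bl) = pvPos s bl := by
  induction bl with
  | nil => intro s; rfl
  | cons g G ih =>
    intro s
    rw [show pvFlat (g :: G) = true :: (List.replicate g false ++ pvFlat G) from rfl,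
      show pvOnes s (true :: (List.replicate g false ++ pvFlat G))
        = s :: pvOnes (s + 1) (List.replicate g false ++ pvFlat G) from rfl,
      pvOnes_rep, ih]
    rw [show pvPos s (g :: G) = s :: pvPos (s + g + 1) G from rfl]
    congr 2
    ring

theorem pvOnes_toBs (k0 : Nat) (bl : List Nat) :
    pvOnes 0 (pvToBs k0 bl) = pvPos (k0 : Int) bl := by
  unfold pvToBs
  rw [pvOnes_rep, pvOnes_flat]
  norm_num

theorem pvFilter_range (k : Nat) : ∀ (s : Int) (q : Int → Bool),
    (PySem.List.pyRange s (s + k) 1).filter q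
      = pvOnes s ((PySem.List.pyRange s (s + k) 1).map q) := by
  induction k with
  | zero =>
    intro s q
    rw [PySem.List.pyRange_one_eq_nil (by norm_num)]
    rfl
  | succ k ih =>
    intro s q
    rw [PySem.List.pyRange_one_cons (by omega)]
    have h1 : s + ((k + 1 : Nat) : Int) = (s + 1) + (k : Nat) := by push_cast; ring
    rw [h1]
    cases hq : q s with
    | false =>
      simp only [List.filter_cons, hq, List.map_cons]
      rw [show pvOnes s (false :: (PySem.List.pyRange (s + 1) (s + 1 + (k : Nat)) 1).map q)
            = pvOnes (s + 1) ((PySem.List.pyRange (s + 1) (s + 1 + (k : Nat)) 1).map q) from rfl]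
      exact ih (s + 1) q
    | true =>
      simp only [List.filter_cons, hq, List.map_cons]
      rw [show pvOnes s (true :: (PySem.List.pyRange (s + 1) (s + 1 + (k : Nat)) 1).map q)
            = s :: pvOnes (s + 1) ((PySem.List.pyRange (s + 1) (s + 1 + (k : Nat)) 1).map q) from rfl]
      rw [ih (s + 1) q]
      simp

-- ---------- main equivalence ----------

theorem pvAlt_to_fold (arr : List Int) (n : Int) :
    min_iterations_to_fill_ones_alt arr n
      = (((pvB none ((PySem.List.pyRange 0 n 1).map (fun i => PySem.List.pyGetD arr i 0 == 1))).zip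
          (pvR ((PySem.List.pyRange 0 n 1).map (fun i => PySem.List.pyGetD arr i 0 == 1)) none)).foldl
          pvCb (-1)) := by
  unfold min_iterations_to_fill_ones_alt
  simp only [pvSweepB_eq, List.map_reverse, List.map_map, pvR_rev]
  rfl

theorem pvPorts_eq (arr : List Int) (n : Int) :
    min_iterations_to_fill_ones arr n = min_iterations_to_fill_ones_alt arr n := by
  rw [pvA_to_gap, pvAlt_to_fold]
  by_cases hn : n ≤ 0
  · rw [PySem.List.pyRange_one_eq_nil (by omega)]
    rfl
  · rw [not_le] at hn
    have hm : ((n.toNat : Nat) : Int) = n := Int.toNat_of_nonneg (le_of_lt hn)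
    have hfil : (PySem.List.pyRange 0 n 1).filter (fun i => PySem.List.pyGetD arr i 0 == 1)
        = pvOnes 0 ((PySem.List.pyRange 0 n 1).map (fun i => PySem.List.pyGetD arr i 0 == 1)) := by
      have h := pvFilter_range n.toNat 0 (fun i => PySem.List.pyGetD arr i 0 == 1)
      rw [zero_add, hm] at h
      exact h
    rw [hfil]
    have hshape := pvParse_toBs
      ((PySem.List.pyRange 0 n 1).map (fun i => PySem.List.pyGetD arr i 0 == 1))
    set bs := (PySem.List.pyRange 0 n 1).map (fun i => PySem.List.pyGetD arr i 0 == 1) with hbs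
    set k0 := (pvParse bs).1 with hk0
    set bl := (pvParse bs).2 with hbl
    have hlen : ((k0 : Int) + ((pvW bl : Nat) : Int)) = n := by
      have h1 : bs.length = n.toNat := by
        rw [hbs, List.length_map, PySem.List.length_pyRange_one]
        norm_num
      have h2 : (pvToBs k0 bl).length = k0 + pvW bl := pvToBs_length k0 bl
      rw [hshape, h1] at h2
      omega
    rw [← hshape, pvOnes_toBs]
    cases hblc : bl with
    | nil =>
      rw [show pvPos ((k0 : Nat) : Int) [] = [] from rfl]
      rw [show pvGapG [] n = -1 from rfl]
      rw [pvB_shape_nil]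
    | cons g G =>
      rw [pvB_shape_cons]
      rw [← hblc]
      rw [show n = ((k0 : Int) + ((pvW bl : Nat) : Int)) from hlen.symm]
      rw [hblc]
      exact pvGapG_shape (g :: G) (k0 : Int) (by simp)

-- ===== VERDICT (by name: the statement is the Claim_ definition above) =====
theorem min_iterations_to_fill_ones_spec : Claim_equal_min_iterations_to_fill_ones := by
  intro arr n _ _
  unfold Spec_min_iterations_to_fill_ones
  exact pvPorts_eq arr n
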